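-- pv_equiv track=rewrite | github.com/ashupk/spotify-mbti-app | stage_spotifyapp.py | mbti_from_genres
-- ===== SOURCE A (Python) =====
-- def mbti_from_genres(genres):
--     traits = {'I': 0, 'E': 0, 'N': 0, 'S': 0, 'T': 0, 'F': 0, 'J': 0, 'P': 0}
--     for genre in genres:
--         genre = genre.lower()
--         if genre in ['indie', 'folk', 'ambient', 'lo-fi']:
--             traits['I'] += 1; traits['N'] += 1; traits['F'] += 1; traits['P'] += 1
--         elif genre in ['pop', 'dance pop', 'electropop', 'k-pop']:
--             traits['E'] += 1; traits['S'] += 1; traits['F'] += 1; traits['J'] += 1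
--         elif genre in ['hip hop', 'rap', 'trap']:
--             traits['E'] += 1; traits['S'] += 1; traits['T'] += 1; traits['P'] += 1
--         elif genre in ['classical', 'jazz', 'instrumental']:
--             traits['I'] += 1; traits['N'] += 1; traits['T'] += 1; traits['J'] += 1
--         elif genre in ['rock', 'metal', 'punk']:
--             traits['E'] += 1; traits['S'] += 1; traits['T'] += 1; traits['P'] += 1
--         elif genre in ['r&b', 'soul']:
--             traits['I'] += 1; traits['F'] += 1; traits['J'] += 1
--         elif genre in ['alternative']:
--             traits['I'] += 1; traits['N'] += 1; traits['T'] += 1; traits['P'] += 1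
--
--     return (
--         ('I' if traits['I'] >= traits['E'] else 'E') +
--         ('N' if traits['N'] >= traits['S'] else 'S') +
--         ('T' if traits['T'] >= traits['F'] else 'F') +
--         ('J' if traits['J'] >= traits['P'] else 'P')
--     )
-- ===== SOURCE B (Python) =====
-- # B: staged per-letter counting. Lower-case the list once, then decide each MBTI
-- # axis independently by counting how many genres lie in that letter's genre set,
-- # with no per-genre classification loop and no running trait accumulator.
--
-- _AXES = (
--     ('IE',
--      frozenset({'indie', 'folk', 'ambient', 'lo-fi', 'classical', 'jazz',
--                 'instrumental', 'r&b', 'soul', 'alternative'}),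
--      frozenset({'pop', 'dance pop', 'electropop', 'k-pop', 'hip hop', 'rap',
--                 'trap', 'rock', 'metal', 'punk'})),
--     ('NS',
--      frozenset({'indie', 'folk', 'ambient', 'lo-fi', 'classical', 'jazz',
--                 'instrumental', 'alternative'}),
--      frozenset({'pop', 'dance pop', 'electropop', 'k-pop', 'hip hop', 'rap',
--                 'trap', 'rock', 'metal', 'punk'})),
--     ('TF',
--      frozenset({'hip hop', 'rap', 'trap', 'classical', 'jazz', 'instrumental',
--                 'rock', 'metal', 'punk', 'alternative'}),
--      frozenset({'indie', 'folk', 'ambient', 'lo-fi', 'pop', 'dance pop',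
--                 'electropop', 'k-pop', 'r&b', 'soul'})),
--     ('JP',
--      frozenset({'pop', 'dance pop', 'electropop', 'k-pop', 'classical', 'jazz',
--                 'instrumental', 'r&b', 'soul'}),
--      frozenset({'indie', 'folk', 'ambient', 'lo-fi', 'hip hop', 'rap', 'trap',
--                 'rock', 'metal', 'punk', 'alternative'})),
-- )
--
--
-- def mbti_from_genres(genres):
--     gs = [g.lower() for g in genres]
--     return ''.join(
--         pair[0] if sum(g in first for g in gs) >= sum(g in second for g in gs)
--         else pair[1]
--         for pair, first, second in _AXES
--     )
-- ===== Notes on version B (the rewrite author's own statement) =====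
-- stated objective: alternative
-- what changed: Instead of A's single classification loop that matches each genre against seven genre groups and bumps eight named trait counters, B makes four independent per-axis passes: each MBTI letter is decided on its own by counting the genres that belong to that letter's static genre set versus the opposite letter's set (staged counting passes with no per-genre branch chain and no running trait state).
import Mathlib
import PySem

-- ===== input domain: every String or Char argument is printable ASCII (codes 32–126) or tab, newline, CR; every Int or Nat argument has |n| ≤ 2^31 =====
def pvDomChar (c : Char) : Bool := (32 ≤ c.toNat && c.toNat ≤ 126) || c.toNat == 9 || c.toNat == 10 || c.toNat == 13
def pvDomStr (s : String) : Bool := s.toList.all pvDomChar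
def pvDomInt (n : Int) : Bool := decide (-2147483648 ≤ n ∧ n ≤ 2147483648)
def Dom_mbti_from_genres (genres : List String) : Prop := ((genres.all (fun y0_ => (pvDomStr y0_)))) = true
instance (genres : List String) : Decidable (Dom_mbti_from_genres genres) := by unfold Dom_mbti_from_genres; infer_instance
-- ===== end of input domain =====

-- B replaces A's per-genre classification loop over eight trait counters by four
-- independent per-axis counting passes over static genre sets (alternative decomposition).

-- ===== PORT A =====
-- one loop iteration of A: lower the genre and bump the matching counters in the dict
def mbtiStepA (t : PySem.Dict String Int) (genre : String) : PySem.Dict String Int :=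
  let g := PySem.Str.lower genre
  if g ∈ ["indie", "folk", "ambient", "lo-fi"] then
    let t := t.insert "I" (t.getD "I" 0 + 1)
    let t := t.insert "N" (t.getD "N" 0 + 1)
    let t := t.insert "F" (t.getD "F" 0 + 1)
    t.insert "P" (t.getD "P" 0 + 1)
  else if g ∈ ["pop", "dance pop", "electropop", "k-pop"] then
    let t := t.insert "E" (t.getD "E" 0 + 1)
    let t := t.insert "S" (t.getD "S" 0 + 1)
    let t := t.insert "F" (t.getD "F" 0 + 1)
    t.insert "J" (t.getD "J" 0 + 1)
  else if g ∈ ["hip hop", "rap", "trap"] then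
    let t := t.insert "E" (t.getD "E" 0 + 1)
    let t := t.insert "S" (t.getD "S" 0 + 1)
    let t := t.insert "T" (t.getD "T" 0 + 1)
    t.insert "P" (t.getD "P" 0 + 1)
  else if g ∈ ["classical", "jazz", "instrumental"] then
    let t := t.insert "I" (t.getD "I" 0 + 1)
    let t := t.insert "N" (t.getD "N" 0 + 1)
    let t := t.insert "T" (t.getD "T" 0 + 1)
    t.insert "J" (t.getD "J" 0 + 1)
  else if g ∈ ["rock", "metal", "punk"] then
    let t := t.insert "E" (t.getD "E" 0 + 1)
    let t := t.insert "S" (t.getD "S" 0 + 1)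
    let t := t.insert "T" (t.getD "T" 0 + 1)
    t.insert "P" (t.getD "P" 0 + 1)
  else if g ∈ ["r&b", "soul"] then
    let t := t.insert "I" (t.getD "I" 0 + 1)
    let t := t.insert "F" (t.getD "F" 0 + 1)
    t.insert "J" (t.getD "J" 0 + 1)
  else if g ∈ ["alternative"] then
    let t := t.insert "I" (t.getD "I" 0 + 1)
    let t := t.insert "N" (t.getD "N" 0 + 1)
    let t := t.insert "T" (t.getD "T" 0 + 1)
    t.insert "P" (t.getD "P" 0 + 1)
  else t

def mbti_from_genres (genres : List String) : String :=
  let traits : PySem.Dict String Int :=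
    PySem.Dict.ofList [("I", 0), ("E", 0), ("N", 0), ("S", 0), ("T", 0), ("F", 0), ("J", 0), ("P", 0)]
  let traits := genres.foldl mbtiStepA traits
  (if traits.getD "E" 0 ≤ traits.getD "I" 0 then "I" else "E") ++
  (if traits.getD "S" 0 ≤ traits.getD "N" 0 then "N" else "S") ++
  (if traits.getD "F" 0 ≤ traits.getD "T" 0 then "T" else "F") ++
  (if traits.getD "P" 0 ≤ traits.getD "J" 0 then "J" else "P")

-- ===== PORT B =====
-- the static per-letter genre sets of Source B (sets of distinct string literals)
def mbtiSetI : List String := ["indie", "folk", "ambient", "lo-fi", "classical", "jazz", "instrumental", "r&b", "soul", "alternative"]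
def mbtiSetE : List String := ["pop", "dance pop", "electropop", "k-pop", "hip hop", "rap", "trap", "rock", "metal", "punk"]
def mbtiSetN : List String := ["indie", "folk", "ambient", "lo-fi", "classical", "jazz", "instrumental", "alternative"]
def mbtiSetS : List String := ["pop", "dance pop", "electropop", "k-pop", "hip hop", "rap", "trap", "rock", "metal", "punk"]
def mbtiSetT : List String := ["hip hop", "rap", "trap", "classical", "jazz", "instrumental", "rock", "metal", "punk", "alternative"]
def mbtiSetF : List String := ["indie", "folk", "ambient", "lo-fi", "pop", "dance pop", "electropop", "k-pop", "r&b", "soul"]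
def mbtiSetJ : List String := ["pop", "dance pop", "electropop", "k-pop", "classical", "jazz", "instrumental", "r&b", "soul"]
def mbtiSetP : List String := ["indie", "folk", "ambient", "lo-fi", "hip hop", "rap", "trap", "rock", "metal", "punk", "alternative"]

-- sum(g in st for g in gs): one counting pass over gs
def mbtiSumIn (st : List String) (gs : List String) : Int :=
  gs.foldl (fun a g => a + (if g ∈ st then 1 else 0)) 0

-- one axis: first letter iff its count is ≥ the opposite letter's count
def mbtiAxis (gs : List String) (first second : List String) (w l : String) : String :=
  if mbtiSumIn second gs ≤ mbtiSumIn first gs then w else l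

def mbti_from_genres_alt (genres : List String) : String :=
  let gs := genres.map PySem.Str.lower
  mbtiAxis gs mbtiSetI mbtiSetE "I" "E" ++
  mbtiAxis gs mbtiSetN mbtiSetS "N" "S" ++
  mbtiAxis gs mbtiSetT mbtiSetF "T" "F" ++
  mbtiAxis gs mbtiSetJ mbtiSetP "J" "P"

-- ===== PRECONDITION & SPEC =====
def Spec_mbti_from_genres (genres : List String) (out : String) : Prop := out = mbti_from_genres_alt genres
instance (genres : List String) (out : String) : Decidable (Spec_mbti_from_genres genres out) := by unfold Spec_mbti_from_genres; infer_instance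

-- ===== CLAIM (what is proved, stated in full; the proofs are below) =====
def Claim_equal_mbti_from_genres : Prop := ∀ (genres : List String), Dom_mbti_from_genres genres → Spec_mbti_from_genres genres (mbti_from_genres genres)

-- ===== LEMMAS AND PROOFS =====

lemma mbtiSumIn_shift (st : List String) (gs : List String) (a : Int) :
    gs.foldl (fun a g => a + (if g ∈ st then 1 else 0)) a = a + mbtiSumIn st gs := by
  induction gs generalizing a with
  | nil => simp [mbtiSumIn]
  | cons x xs ih =>
    simp only [mbtiSumIn, List.foldl_cons]
    rw [ih, ih (0 + _)]
    ring

lemma mbtiSumIn_cons (st : List String) (x : String) (xs : List String) :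
    mbtiSumIn st (x :: xs) = (if x ∈ st then 1 else 0) + mbtiSumIn st xs := by
  simp only [mbtiSumIn, List.foldl_cons]
  rw [mbtiSumIn_shift]
  unfold mbtiSumIn
  ring

-- one A-step bumps each counter by exactly the indicator of the corresponding B-set
set_option maxHeartbeats 2000000 in
lemma mbti_step_count (t : PySem.Dict String Int) (g : String) :
    (mbtiStepA t g).getD "I" 0 = t.getD "I" 0 + (if PySem.Str.lower g ∈ mbtiSetI then 1 else 0) ∧
    (mbtiStepA t g).getD "E" 0 = t.getD "E" 0 + (if PySem.Str.lower g ∈ mbtiSetE then 1 else 0) ∧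
    (mbtiStepA t g).getD "N" 0 = t.getD "N" 0 + (if PySem.Str.lower g ∈ mbtiSetN then 1 else 0) ∧
    (mbtiStepA t g).getD "S" 0 = t.getD "S" 0 + (if PySem.Str.lower g ∈ mbtiSetS then 1 else 0) ∧
    (mbtiStepA t g).getD "T" 0 = t.getD "T" 0 + (if PySem.Str.lower g ∈ mbtiSetT then 1 else 0) ∧
    (mbtiStepA t g).getD "F" 0 = t.getD "F" 0 + (if PySem.Str.lower g ∈ mbtiSetF then 1 else 0) ∧
    (mbtiStepA t g).getD "J" 0 = t.getD "J" 0 + (if PySem.Str.lower g ∈ mbtiSetJ then 1 else 0) ∧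
    (mbtiStepA t g).getD "P" 0 = t.getD "P" 0 + (if PySem.Str.lower g ∈ mbtiSetP then 1 else 0) := by
  unfold mbtiStepA mbtiSetI mbtiSetE mbtiSetN mbtiSetS mbtiSetT mbtiSetF mbtiSetJ mbtiSetP
  generalize PySem.Str.lower g = x
  by_cases c1 : x = "indie" ∨ x = "folk" ∨ x = "ambient" ∨ x = "lo-fi"
  · rcases c1 with h|h|h|h <;> subst h <;>
      simp [PySem.Dict.getD_insert]
  · rw [if_neg (by simpa using c1)]
    by_cases c2 : x = "pop" ∨ x = "dance pop" ∨ x = "electropop" ∨ x = "k-pop"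
    · rcases c2 with h|h|h|h <;> subst h <;>
        simp [PySem.Dict.getD_insert]
    · rw [if_neg (by simpa using c2)]
      by_cases c3 : x = "hip hop" ∨ x = "rap" ∨ x = "trap"
      · rcases c3 with h|h|h <;> subst h <;>
          simp [PySem.Dict.getD_insert]
      · rw [if_neg (by simpa using c3)]
        by_cases c4 : x = "classical" ∨ x = "jazz" ∨ x = "instrumental"
        · rcases c4 with h|h|h <;> subst h <;>
            simp [PySem.Dict.getD_insert]
        · rw [if_neg (by simpa using c4)]
          by_cases c5 : x = "rock" ∨ x = "metal" ∨ x = "punk"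
          · rcases c5 with h|h|h <;> subst h <;>
              simp [PySem.Dict.getD_insert]
          · rw [if_neg (by simpa using c5)]
            by_cases c6 : x = "r&b" ∨ x = "soul"
            · rcases c6 with h|h <;> subst h <;>
                simp [PySem.Dict.getD_insert]
            · rw [if_neg (by simpa using c6)]
              by_cases c7 : x = "alternative"
              · subst c7
                simp [PySem.Dict.getD_insert]
              · rw [if_neg (by simpa using c7)]
                simp only [not_or] at c1 c2 c3 c4 c5 c6
                obtain ⟨a1, a2, a3, a4⟩ := c1
                obtain ⟨b1, b2, b3, b4⟩ := c2
                obtain ⟨d1, d2, d3⟩ := c3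
                obtain ⟨e1, e2, e3⟩ := c4
                obtain ⟨f1, f2, f3⟩ := c5
                obtain ⟨g1, g2⟩ := c6
                refine ⟨?_, ?_, ?_, ?_, ?_, ?_, ?_, ?_⟩ <;>
                  rw [if_neg (by simp [List.mem_cons]; tauto)] <;> ring

lemma mbti_fold_count (genres : List String) (t : PySem.Dict String Int) :
    (genres.foldl mbtiStepA t).getD "I" 0 = t.getD "I" 0 + mbtiSumIn mbtiSetI (genres.map PySem.Str.lower) ∧
    (genres.foldl mbtiStepA t).getD "E" 0 = t.getD "E" 0 + mbtiSumIn mbtiSetE (genres.map PySem.Str.lower) ∧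
    (genres.foldl mbtiStepA t).getD "N" 0 = t.getD "N" 0 + mbtiSumIn mbtiSetN (genres.map PySem.Str.lower) ∧
    (genres.foldl mbtiStepA t).getD "S" 0 = t.getD "S" 0 + mbtiSumIn mbtiSetS (genres.map PySem.Str.lower) ∧
    (genres.foldl mbtiStepA t).getD "T" 0 = t.getD "T" 0 + mbtiSumIn mbtiSetT (genres.map PySem.Str.lower) ∧
    (genres.foldl mbtiStepA t).getD "F" 0 = t.getD "F" 0 + mbtiSumIn mbtiSetF (genres.map PySem.Str.lower) ∧
    (genres.foldl mbtiStepA t).getD "J" 0 = t.getD "J" 0 + mbtiSumIn mbtiSetJ (genres.map PySem.Str.lower) ∧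
    (genres.foldl mbtiStepA t).getD "P" 0 = t.getD "P" 0 + mbtiSumIn mbtiSetP (genres.map PySem.Str.lower) := by
  induction genres generalizing t with
  | nil => simp [mbtiSumIn]
  | cons g gs ih =>
    obtain ⟨k1, k2, k3, k4, k5, k6, k7, k8⟩ := mbti_step_count t g
    obtain ⟨m1, m2, m3, m4, m5, m6, m7, m8⟩ := ih (mbtiStepA t g)
    simp only [List.foldl_cons, List.map_cons, mbtiSumIn_cons]
    refine ⟨?_, ?_, ?_, ?_, ?_, ?_, ?_, ?_⟩ <;> omega

-- ===== VERDICT (by name: the statement is the Claim_ definition above) =====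
theorem mbti_from_genres_spec : Claim_equal_mbti_from_genres := by
  intro genres _
  unfold Spec_mbti_from_genres mbti_from_genres mbti_from_genres_alt mbtiAxis
  dsimp only
  obtain ⟨k1, k2, k3, k4, k5, k6, k7, k8⟩ := mbti_fold_count genres
    (PySem.Dict.ofList [("I", 0), ("E", 0), ("N", 0), ("S", 0), ("T", 0), ("F", 0), ("J", 0), ("P", 0)])
  rw [k1, k2, k3, k4, k5, k6, k7, k8]
  have hI : (PySem.Dict.ofList [("I", (0:Int)), ("E", 0), ("N", 0), ("S", 0), ("T", 0), ("F", 0), ("J", 0), ("P", 0)]).getD "I" 0 = 0 := by decide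
  have hE : (PySem.Dict.ofList [("I", (0:Int)), ("E", 0), ("N", 0), ("S", 0), ("T", 0), ("F", 0), ("J", 0), ("P", 0)]).getD "E" 0 = 0 := by decide
  have hN : (PySem.Dict.ofList [("I", (0:Int)), ("E", 0), ("N", 0), ("S", 0), ("T", 0), ("F", 0), ("J", 0), ("P", 0)]).getD "N" 0 = 0 := by decide
  have hS : (PySem.Dict.ofList [("I", (0:Int)), ("E", 0), ("N", 0), ("S", 0), ("T", 0), ("F", 0), ("J", 0), ("P", 0)]).getD "S" 0 = 0 := by decide
  have hT : (PySem.Dict.ofList [("I", (0:Int)), ("E", 0), ("N", 0), ("S", 0), ("T", 0), ("F", 0), ("J", 0), ("P", 0)]).getD "T" 0 = 0 := by decide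
  have hF : (PySem.Dict.ofList [("I", (0:Int)), ("E", 0), ("N", 0), ("S", 0), ("T", 0), ("F", 0), ("J", 0), ("P", 0)]).getD "F" 0 = 0 := by decide
  have hJ : (PySem.Dict.ofList [("I", (0:Int)), ("E", 0), ("N", 0), ("S", 0), ("T", 0), ("F", 0), ("J", 0), ("P", 0)]).getD "J" 0 = 0 := by decide
  have hP : (PySem.Dict.ofList [("I", (0:Int)), ("E", 0), ("N", 0), ("S", 0), ("T", 0), ("F", 0), ("J", 0), ("P", 0)]).getD "P" 0 = 0 := by decide
  simp only [hI, hE, hN, hS, hT, hF, hJ, hP, zero_add]
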